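-- pv_equiv track=rewrite | github.com/LTSHFWJT/SecEventMonitor | seceventmonitor/services/collectors/nvd.py | _pick_description
-- ===== SOURCE A (Python) =====
-- def _pick_description(descriptions):
--     for item in descriptions:
--         if item.get("lang") == "en" and item.get("value"):
--             return item["value"].strip(), (item.get("lang") or "").strip().lower() or None
--     for item in descriptions:
--         if item.get("value"):
--             return item["value"].strip(), (item.get("lang") or "").strip().lower() or None
--     return "", None
-- ===== SOURCE B (Python) =====
-- def _pick_description(descriptions):
--     fallback = None
--     for item in descriptions:
--         if item.get("lang") == "en" and item.get("value"):
--             return item["value"].strip(), (item.get("lang") or "").strip().lower() or None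
--         if fallback is None and item.get("value"):
--             fallback = item
--     if fallback is not None:
--         return fallback["value"].strip(), (fallback.get("lang") or "").strip().lower() or None
--     return "", None
-- ===== Notes on version B (the rewrite author's own statement) =====
-- stated objective: simpler
-- what changed: Replaced A's two sequential scans (first for an English entry, then for any entry with a value) by a single loop that short-circuits on an English match while remembering the first non-empty item as a fallback.
import Mathlib
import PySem

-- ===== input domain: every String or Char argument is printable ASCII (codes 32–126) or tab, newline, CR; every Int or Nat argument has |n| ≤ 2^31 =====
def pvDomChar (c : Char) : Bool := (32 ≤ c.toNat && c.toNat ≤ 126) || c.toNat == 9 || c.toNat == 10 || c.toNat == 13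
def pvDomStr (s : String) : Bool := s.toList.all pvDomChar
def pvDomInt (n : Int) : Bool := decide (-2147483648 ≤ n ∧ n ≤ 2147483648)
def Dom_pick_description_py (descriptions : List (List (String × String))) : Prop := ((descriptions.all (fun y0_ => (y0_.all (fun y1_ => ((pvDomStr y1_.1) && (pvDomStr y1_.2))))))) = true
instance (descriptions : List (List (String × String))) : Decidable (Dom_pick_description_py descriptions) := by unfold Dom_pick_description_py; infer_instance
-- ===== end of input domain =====

-- B replaces A's two sequential scans by a single loop with a first-non-empty fallback (simpler decomposition; same cost).
-- ===== PORT A =====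
-- shared helpers: truthiness of item.get("value"), the en test, and the returned pair
def pdHasValue (item : List (String × String)) : Bool :=
  ((PySem.Dict.get? (PySem.Dict.mk item) "value").getD "") != ""

def pdIsEn (item : List (String × String)) : Bool :=
  (PySem.Dict.get? (PySem.Dict.mk item) "lang" == some "en") && pdHasValue item

-- (item["value"].strip(), (item.get("lang") or "").strip().lower() or None); used only when "value" is present and non-empty
def pdOut (item : List (String × String)) : String × Option String :=
  let v := PySem.Str.strip ((PySem.Dict.get? (PySem.Dict.mk item) "value").getD "")
  let l := PySem.Str.lower (PySem.Str.strip ((PySem.Dict.get? (PySem.Dict.mk item) "lang").getD ""))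
  (v, if l = "" then none else some l)

-- first loop of A: first item with lang=="en" and truthy value
def pickFirstEn : List (List (String × String)) → Option (String × Option String)
  | [] => none
  | item :: rest => if pdIsEn item then some (pdOut item) else pickFirstEn rest

-- second loop of A: first item with truthy value
def pickFirstVal : List (List (String × String)) → Option (String × Option String)
  | [] => none
  | item :: rest => if pdHasValue item then some (pdOut item) else pickFirstVal rest

def pick_description_py (descriptions : List (List (String × String))) : String × Option String :=
  match pickFirstEn descriptions with
  | some r => r
  | none =>
    match pickFirstVal descriptions with
    | some r => r
    | none => ("", none)

-- ===== PORT B =====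
-- single pass: return on an English match, else remember the first non-empty item as fallback
def pickLoop : List (List (String × String)) → Option (List (String × String)) → String × Option String
  | [], fb =>
    match fb with
    | some f => pdOut f
    | none => ("", none)
  | item :: rest, fb =>
    if pdIsEn item then pdOut item
    else pickLoop rest (if fb.isNone && pdHasValue item then some item else fb)

def pick_description_py_alt (descriptions : List (List (String × String))) : String × Option String :=
  pickLoop descriptions none

-- ===== PRECONDITION & SPEC =====
def Spec_pick_description_py (descriptions : List (List (String × String))) (out : String × Option String) : Prop := out = pick_description_py_alt descriptions
instance (descriptions : List (List (String × String))) (out : String × Option String) : Decidable (Spec_pick_description_py descriptions out) := by unfold Spec_pick_description_py; infer_instance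

-- ===== CLAIM (what is proved, stated in full; the proofs are below) =====
def Claim_equal_pick_description_py : Prop := ∀ (descriptions : List (List (String × String))), Dom_pick_description_py descriptions → Spec_pick_description_py descriptions (pick_description_py descriptions)

-- ===== LEMMAS AND PROOFS =====
theorem pickLoop_eq (ds : List (List (String × String))) (fb : Option (List (String × String))) :
    pickLoop ds fb =
      match pickFirstEn ds with
      | some r => r
      | none =>
        match fb with
        | some f => pdOut f
        | none =>
          match pickFirstVal ds with
          | some r => r
          | none => ("", none) := by
  induction ds generalizing fb with
  | nil => cases fb <;> simp [pickLoop, pickFirstEn, pickFirstVal]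
  | cons item rest ih =>
    by_cases hen : pdIsEn item = true
    · simp [pickLoop, pickFirstEn, hen]
    · cases fb with
      | some f => simp [pickLoop, pickFirstEn, hen, ih]
      | none =>
        by_cases hv : pdHasValue item = true
        · simp [pickLoop, pickFirstEn, pickFirstVal, hen, hv, ih]
        · simp [pickLoop, pickFirstEn, pickFirstVal, hen, hv, ih]

-- ===== VERDICT (by name: the statement is the Claim_ definition above) =====
theorem pick_description_py_spec : Claim_equal_pick_description_py := by
  intro ds _
  unfold Spec_pick_description_py pick_description_py pick_description_py_alt
  rw [pickLoop_eq]
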